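-- pv_equiv track=rewrite | github.com/dprophete/advent-2023 | day09/p2.py | process_history
-- ===== SOURCE A (Python) =====
-- def compute_next_row(row):
--     return [row[i+1] - row[i] for i in range(len(row) - 1)]
--
-- def is_final_row(row):
--     return len(row) == 1 or all(x == 0 for x in row)
--
-- def process_history(history):
--     row = history
--     rows = [row]
--     while (not is_final_row(row)):
--         row = compute_next_row(row)
--         rows.append(row)
--
--     rows.reverse()
--     rows[0].append(0)
--     for i in range(1, len(rows)):
--         rows[i].insert(0, rows[i][0] - rows[i-1][0])
--     return rows[-1][0]
-- ===== SOURCE B (Python) =====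
-- # Newton backward-extrapolation closed form: prev = sum_j (-1)^j * C(n, j+1) * history[j],
-- # computed in one pass with an incrementally updated binomial coefficient.
-- # (A mutates `history` in place; B does not — the equivalence is about the return value.)
-- def process_history(history):
--     n = len(history)
--     total = 0
--     sign = 1
--     c = n  # C(n, 1)
--     for j, y in enumerate(history):
--         total += sign * c * y
--         sign = -sign
--         c = c * (n - j - 1) // (j + 2)  # C(n, j+2)
--     return total
-- ===== Notes on version B (the rewrite author's own statement) =====
-- stated objective: faster
-- what changed: Replaced A's construction of the full finite-difference table plus a reversed insert pass by the one-pass Newton backward-extrapolation closed form sum_j (-1)^j * C(n, j+1) * history[j] with an incrementally updated binomial coefficient.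
import Mathlib
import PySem

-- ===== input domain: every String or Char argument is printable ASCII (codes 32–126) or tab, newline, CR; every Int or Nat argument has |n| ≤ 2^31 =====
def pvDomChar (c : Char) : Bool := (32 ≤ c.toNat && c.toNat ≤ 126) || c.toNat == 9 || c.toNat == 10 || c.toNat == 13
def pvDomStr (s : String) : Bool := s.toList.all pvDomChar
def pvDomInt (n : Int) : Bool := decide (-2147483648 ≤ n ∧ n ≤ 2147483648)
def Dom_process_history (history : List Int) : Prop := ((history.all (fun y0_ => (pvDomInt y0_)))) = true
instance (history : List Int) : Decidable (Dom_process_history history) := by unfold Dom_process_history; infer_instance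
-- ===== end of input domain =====

-- B replaces A's O(n^2) difference table by the one-pass Newton closed form
-- sum_j (-1)^j * C(n, j+1) * history[j]; A mutates `history` in place (insert/append),
-- B does not — the equivalence proved is about the return value.

-- ===== PORT A =====
def compute_next_row (row : List Int) : List Int :=
  (PySem.List.pyRange 0 ((row.length : Int) - 1) 1).map
    (fun i => PySem.List.pyGetD row (i + 1) 0 - PySem.List.pyGetD row i 0)
    -- pyGetD is exact here: every index i, i+1 with 0 ≤ i < len-1 is in range

def is_final_row (row : List Int) : Bool :=
  row.length == 1 || row.all (fun x => x == 0)

theorem length_compute_next_row (row : List Int) :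
    (compute_next_row row).length = row.length - 1 := by
  simp [compute_next_row, PySem.List.length_pyRange_one]

theorem not_final_two_le (row : List Int) (h : is_final_row row = false) :
    2 ≤ row.length := by
  cases row with
  | nil => simp [is_final_row] at h
  | cons x xs =>
    simp [is_final_row] at h
    cases xs with
    | nil => simp at h
    | cons a b => simp

-- the Python while loop, accumulating `rows`
def ph_rows (row : List Int) (rows : List (List Int)) : List (List Int) :=
  if is_final_row row then rows
  else
    let r := compute_next_row row
    ph_rows r (rows ++ [r])
termination_by row.length
decreasing_by
  rename_i h
  have hf : is_final_row row = false := by revert h; cases is_final_row row <;> simp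
  have := not_final_two_le row hf
  have := length_compute_next_row row
  omega

def process_history (history : List Int) : Int :=
  let rows := ph_rows history [history]
  let rows := rows.reverse
  let rows :=
    match rows with
    | [] => ([] : List (List Int))
    | r :: rest => (r ++ [0]) :: rest        -- rows[0].append(0)
  match rows with
  | [] => 0                                  -- unreachable: rows is never empty
  | r0 :: rest =>
    -- for i in range(1, len(rows)): rows[i].insert(0, rows[i][0] - rows[i-1][0])
    -- `headD 0` is rows[i][0]: every row reached here is nonempty, so it is exact
    (rest.foldl (fun prev r => (r.headD 0 - prev.headD 0) :: r) r0).headD 0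

-- ===== PORT B =====
def process_history_alt (history : List Int) : Int :=
  let n : Int := (history.length : Int)
  (((PySem.List.enumerate history 0).foldl
      (fun (st : Int × Int × Int) p =>
        (st.1 + st.2.1 * st.2.2 * p.2, -st.2.1,
         PySem.Int.floordiv (st.2.2 * (n - p.1 - 1)) (p.1 + 2)))
      (0, 1, n))).1

-- ===== PRECONDITION & SPEC =====
def Spec_process_history (history : List Int) (out : Int) : Prop := out = process_history_alt history
instance (history : List Int) (out : Int) : Decidable (Spec_process_history history out) := by unfold Spec_process_history; infer_instance

-- ===== CLAIM (what is proved, stated in full; the proofs are below) =====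
def Claim_equal_process_history : Prop := ∀ (history : List Int), Dom_process_history history → Spec_process_history history (process_history history)

-- ===== LEMMAS AND PROOFS =====

-- the Newton closed form both ports compute
def cf (h : List Int) : Int :=
  ∑ j ∈ Finset.range h.length, (-1 : Int) ^ j * (h.length.choose (j + 1) : Int) * h.getD j 0

-- A's recursion, abstracted: head minus backward-extrapolation of the difference row
def Rrec (h : List Int) : Int :=
  if is_final_row h then h.headD 0
  else h.headD 0 - Rrec (compute_next_row h)
termination_by h.length
decreasing_by
  rename_i hnf
  have hf : is_final_row h = false := by revert hnf; cases is_final_row h <;> simp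
  have := not_final_two_le h hf
  have := length_compute_next_row h
  omega

-- the tail of A's `rows` list
def chainT (h : List Int) : List (List Int) :=
  if is_final_row h then []
  else compute_next_row h :: chainT (compute_next_row h)
termination_by h.length
decreasing_by
  rename_i hnf
  have hf : is_final_row h = false := by revert hnf; cases is_final_row h <;> simp
  have := not_final_two_le h hf
  have := length_compute_next_row h
  omega

theorem ph_rows_eq (h : List Int) (acc : List (List Int)) :
    ph_rows h acc = acc ++ chainT h := by
  induction h, acc using ph_rows.induct with
  | case1 row rows hf => rw [ph_rows, chainT]; simp [hf]
  | case2 row rows hf r ih =>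
    rw [ph_rows, chainT]
    rw [if_neg hf, if_neg hf]
    show ph_rows r (rows ++ [r]) = rows ++ (r :: chainT r)
    rw [ih]
    simp

-- A's post-processing of the reversed rows list
def finize (rows : List (List Int)) : Int :=
  match rows with
  | [] => 0
  | r0 :: rest =>
    (rest.foldl (fun prev r => (r.headD 0 - prev.headD 0) :: r) (r0 ++ [0])).headD 0

theorem chainT_ne_nil_reverse (d : List Int) :
    ∃ r0 rest, (d :: chainT d).reverse = r0 :: rest := by
  have : (d :: chainT d).reverse ≠ [] := by simp
  exact List.exists_cons_of_ne_nil this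

theorem finize_chain (h : List Int) :
    finize ((h :: chainT h).reverse) = Rrec h := by
  induction h using chainT.induct with
  | case1 h hf =>
    rw [chainT, if_pos hf, Rrec, if_pos hf]
    simp [finize]
  | case2 h hf ih =>
    have hf' : is_final_row h = false := by revert hf; cases is_final_row h <;> simp
    rw [chainT, if_neg hf, Rrec, if_neg hf]
    obtain ⟨r0, rest, hL⟩ := chainT_ne_nil_reverse (compute_next_row h)
    have hL' : (chainT (compute_next_row h)).reverse ++ [compute_next_row h] = r0 :: rest := by
      rw [← List.reverse_cons]; exact hL
    rw [hL] at ih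
    rw [List.reverse_cons, List.reverse_cons, hL']
    simp only [finize, List.cons_append, List.foldl_append, List.foldl_cons, List.foldl_nil,
      List.headD_cons] at ih ⊢
    rw [ih]

theorem processA_eq_Rrec (h : List Int) : process_history h = Rrec h := by
  unfold process_history
  rw [ph_rows_eq]
  obtain ⟨r0, rest, hL⟩ := chainT_ne_nil_reverse h
  rw [← finize_chain h]
  simp only [List.singleton_append, hL]
  simp [finize]

theorem getD_compute_next_row (h : List Int) (j : Nat) (hj : j < h.length - 1) :
    (compute_next_row h).getD j 0 = h.getD (j + 1) 0 - h.getD j 0 := by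
  unfold compute_next_row
  have hcast : (h.length : Int) - 1 = ((h.length - 1 : Nat) : Int) := by omega
  rw [hcast, List.getD_eq_getElem?_getD,
    PySem.List.getElem?_map_pyRange_zero _ _ _ hj]
  rw [show ((j : Int) + 1) = ((j + 1 : Nat) : Int) from by push_cast; ring,
    PySem.List.pyGetD_natCast, PySem.List.pyGetD_natCast]
  simp

theorem cf_step (h : List Int) (hl : 1 ≤ h.length) :
    cf h = h.headD 0 - cf (compute_next_row h) := by
  obtain ⟨m, hm⟩ : ∃ m, h.length = m + 1 := ⟨h.length - 1, by omega⟩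
  have hd : (compute_next_row h).length = m := by rw [length_compute_next_row, hm]; omega
  have h0 : h.getD 0 0 = h.headD 0 := by cases h <;> simp
  have lhs : cf h = ∑ j ∈ Finset.range (m + 1),
      (-1 : Int) ^ j * (((m + 1).choose (j + 1) : Nat) : Int) * h.getD j 0 := by
    unfold cf; rw [hm]
  have hsumd : cf (compute_next_row h) = ∑ j ∈ Finset.range m,
      (-1 : Int) ^ j * ((m.choose (j + 1) : Nat) : Int) * (h.getD (j + 1) 0 - h.getD j 0) := by
    unfold cf
    rw [hd]
    refine Finset.sum_congr rfl (fun j hj => ?_)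
    rw [getD_compute_next_row h j (by rw [hm]; simpa using Finset.mem_range.mp hj)]
  have hsum1 : (∑ j ∈ Finset.range (m + 1),
        (-1 : Int) ^ j * (((m + 1).choose (j + 1) : Nat) : Int) * h.getD j 0)
      = (∑ j ∈ Finset.range (m + 1), (-1 : Int) ^ j * ((m.choose j : Nat) : Int) * h.getD j 0)
        + ∑ j ∈ Finset.range (m + 1), (-1 : Int) ^ j * ((m.choose (j + 1) : Nat) : Int) * h.getD j 0 := by
    rw [← Finset.sum_add_distrib]
    refine Finset.sum_congr rfl (fun j _ => ?_)
    rw [Nat.choose_succ_succ]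
    push_cast
    ring
  have hA : (∑ j ∈ Finset.range (m + 1), (-1 : Int) ^ j * ((m.choose j : Nat) : Int) * h.getD j 0)
      = (∑ j ∈ Finset.range m, -((-1 : Int) ^ j * ((m.choose (j + 1) : Nat) : Int) * h.getD (j + 1) 0))
        + h.getD 0 0 := by
    rw [Finset.sum_range_succ']
    congr 1
    · refine Finset.sum_congr rfl (fun j _ => ?_)
      ring
    · simp
  have hB : (∑ j ∈ Finset.range (m + 1), (-1 : Int) ^ j * ((m.choose (j + 1) : Nat) : Int) * h.getD j 0)
      = ∑ j ∈ Finset.range m, (-1 : Int) ^ j * ((m.choose (j + 1) : Nat) : Int) * h.getD j 0 := by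
    rw [Finset.sum_range_succ, Nat.choose_succ_self]
    simp
  have hC : (∑ j ∈ Finset.range m,
        (-1 : Int) ^ j * ((m.choose (j + 1) : Nat) : Int) * (h.getD (j + 1) 0 - h.getD j 0))
      = (∑ j ∈ Finset.range m, (-1 : Int) ^ j * ((m.choose (j + 1) : Nat) : Int) * h.getD (j + 1) 0)
        - ∑ j ∈ Finset.range m, (-1 : Int) ^ j * ((m.choose (j + 1) : Nat) : Int) * h.getD j 0 := by
    rw [← Finset.sum_sub_distrib]
    refine Finset.sum_congr rfl (fun j _ => ?_)
    ring
  rw [lhs, hsum1, hA, hB, hsumd, hC, ← h0, Finset.sum_neg_distrib]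
  ring

theorem Rrec_eq_cf (h : List Int) : Rrec h = cf h := by
  induction h using Rrec.induct with
  | case1 h hf =>
    rw [Rrec, if_pos hf]
    simp only [is_final_row, Bool.or_eq_true, beq_iff_eq, List.all_eq_true] at hf
    rcases hf with hlen | hall
    · cases h with
      | nil => simp at hlen
      | cons x t =>
        cases t with
        | nil => simp [cf]
        | cons y u => simp at hlen
    · have hz : cf h = 0 := by
        unfold cf
        refine Finset.sum_eq_zero (fun j hj => ?_)
        have hjl : j < h.length := Finset.mem_range.mp hj
        rw [List.getD_eq_getElem?_getD, List.getElem?_eq_getElem hjl]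
        have : h[j] = 0 := by simpa using hall _ (List.getElem_mem hjl)
        simp [this]
      rw [hz]
      cases h with
      | nil => simp
      | cons x t => simpa using hall x (by simp)
  | case2 h hf ih =>
    have hf' : is_final_row h = false := by revert hf; cases is_final_row h <;> simp
    have hl : 1 ≤ h.length := by have := not_final_two_le h hf'; omega
    rw [Rrec, if_neg hf, ih, ← cf_step h hl]

theorem foldB (n : Nat) (l : List Int) : ∀ (k : Nat) (total : Int), k + l.length = n →
    ((PySem.List.enumerate l (k : Int)).foldl
      (fun (st : Int × Int × Int) p =>
        (st.1 + st.2.1 * st.2.2 * p.2, -st.2.1,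
         PySem.Int.floordiv (st.2.2 * ((n : Int) - p.1 - 1)) (p.1 + 2)))
      (total, (-1) ^ k, (n.choose (k + 1) : Int))).1
    = total + ∑ j ∈ Finset.range l.length,
        (-1 : Int) ^ (k + j) * ((n.choose (k + j + 1) : Nat) : Int) * l.getD j 0 := by
  induction l with
  | nil => intro k total hk; simp [PySem.List.enumerate_nil]
  | cons y t ih =>
    intro k total hk
    rw [PySem.List.enumerate_cons]
    simp only [List.foldl_cons]
    have hk1 : k + 1 ≤ n := by simp at hk; omega
    -- the updated coefficient is the next binomial coefficient
    have hmul : ((n.choose (k + 1) : Nat) : Int) * ((n : Int) - (k : Int) - 1)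
        = ((n.choose (k + 2) : Nat) : Int) * ((k : Int) + 2) := by
      have hnat : n.choose (k + 2) * (k + 2) = n.choose (k + 1) * (n - (k + 1)) :=
        Nat.choose_succ_right_eq n (k + 1)
      have hcast : ((n : Int) - (k : Int) - 1) = ((n - (k + 1) : Nat) : Int) := by omega
      rw [hcast, ← Nat.cast_mul, ← hnat]
      push_cast
      ring
    have hc : PySem.Int.floordiv (((n.choose (k + 1) : Nat) : Int) * ((n : Int) - (k : Int) - 1))
        ((k : Int) + 2) = ((n.choose (k + 2) : Nat) : Int) := by
      rw [hmul, PySem.Int.floordiv_eq_ediv_of_pos (by omega)]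
      exact Int.mul_ediv_cancel _ (by omega)
    have hsign : -((-1 : Int) ^ k) = (-1) ^ (k + 1) := by ring
    rw [hc, hsign]
    have hcast1 : ((k : Int) + 1) = (((k + 1 : Nat)) : Int) := by push_cast; ring
    rw [hcast1, ih (k + 1) _ (by simp at hk ⊢; omega)]
    rw [List.length_cons, Finset.sum_range_succ']
    have hstep : ∀ j ∈ Finset.range t.length,
        (-1 : Int) ^ (k + (j + 1)) * ((n.choose (k + (j + 1) + 1) : Nat) : Int) * (y :: t).getD (j + 1) 0
        = (-1 : Int) ^ (k + 1 + j) * ((n.choose (k + 1 + j + 1) : Nat) : Int) * t.getD j 0 := by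
      intro j _
      rw [show k + (j + 1) = k + 1 + j from by omega]
      simp
    rw [Finset.sum_congr rfl hstep]
    simp only [List.getD_cons_zero, Nat.add_zero]
    ring

theorem processB_eq_cf (h : List Int) : process_history_alt h = cf h := by
  unfold process_history_alt cf
  have h0 : ((0 : Nat) : Int) = 0 := rfl
  have := foldB h.length h 0 0 (by omega)
  rw [h0] at this
  simp only [pow_zero, zero_add, Nat.choose_one_right] at this
  exact this

-- ===== VERDICT (by name: the statement is the Claim_ definition above) =====
theorem process_history_spec : Claim_equal_process_history := by
  intro history _
  unfold Spec_process_history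
  rw [processA_eq_Rrec, Rrec_eq_cf, processB_eq_cf]
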